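-- pv_equiv track=rewrite | github.com/Bears-R-Us/arkouda | tests/numpy/alignment_verification/segarray_alignment.py | _ref_ngrams
-- ===== SOURCE A (Python) =====
-- def _ref_ngrams(py: list[list], n: int):
--     # returns columnar (n columns), plus origins
--     cols = [[] for _ in range(n)]
--     origins = []
--     for i, row in enumerate(py):
--         if len(row) < n:
--             continue
--         for start in range(len(row) - n + 1):
--             for j in range(n):
--                 cols[j].append(row[start + j])
--             origins.append(i)
--     return cols, origins
-- ===== SOURCE B (Python) =====
-- def _ref_ngrams(py: list[list], n: int):
--     # returns columnar (n columns), plus origins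
--     qual = [row for row in py if len(row) >= n]
--     cols = [[x for row in qual for x in row[j:j + len(row) - n + 1]]
--             for j in range(n)]
--     origins = [i for i, row in enumerate(py) for _ in range(len(row) - n + 1)]
--     return cols, origins
-- ===== Notes on version B (the rewrite author's own statement) =====
-- stated objective: simpler
-- what changed: Replaces A's triple nested append loop over mutable column lists with a declarative construction: the qualifying rows are filtered once, each column j is then one comprehension concatenating the slices row[j:j+len(row)-n+1], and origins is a separate comprehension repeating each row index len(row)-n+1 times.
import Mathlib
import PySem

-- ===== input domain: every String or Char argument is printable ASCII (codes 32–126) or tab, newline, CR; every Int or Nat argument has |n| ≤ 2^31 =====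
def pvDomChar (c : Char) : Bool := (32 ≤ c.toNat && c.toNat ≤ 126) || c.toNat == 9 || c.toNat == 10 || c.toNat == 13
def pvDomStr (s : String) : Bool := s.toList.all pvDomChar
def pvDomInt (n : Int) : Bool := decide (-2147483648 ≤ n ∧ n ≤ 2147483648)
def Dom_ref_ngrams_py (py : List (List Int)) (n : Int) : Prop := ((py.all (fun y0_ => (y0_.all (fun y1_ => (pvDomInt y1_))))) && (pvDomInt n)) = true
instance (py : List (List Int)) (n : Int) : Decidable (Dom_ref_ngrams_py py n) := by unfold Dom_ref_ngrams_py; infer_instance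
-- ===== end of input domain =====

-- B builds the columns as independent slice-concatenation comprehensions instead of A's
-- triple nested append loop over mutable column lists (objective: simpler; same cost).


-- ===== PORT A =====
-- cols = [[] for _ in range(n)]; for i, row in enumerate(py): if len(row) < n: continue;
--   for start in range(len(row)-n+1): for j in range(n): cols[j].append(row[start+j]); origins.append(i)
def ref_ngrams_py (py : List (List Int)) (n : Int) : List (List Int) × List Int :=
  let cols : List (List Int) := (PySem.List.pyRange 0 n 1).map (fun _ => [])
  (PySem.List.enumerate py 0).foldl
    (fun st p =>
      if ((p.2.length : Int)) < n then st
      else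
        (PySem.List.pyRange 0 ((p.2.length : Int) - n + 1) 1).foldl
          (fun st2 start =>
            ((PySem.List.pyRange 0 n 1).foldl
                (fun cs j => cs.set j.toNat (cs.getD j.toNat [] ++ [PySem.List.pyGetD p.2 (start + j) 0]))
                st2.1,
             st2.2 ++ [p.1]))
          st)
    (cols, [])

-- ===== PORT B =====
-- qual = [row for row in py if len(row) >= n]
-- cols = [[x for row in qual for x in row[j:j+len(row)-n+1]] for j in range(n)]
-- origins = [i for i, row in enumerate(py) for _ in range(len(row)-n+1)]
def ref_ngrams_py_alt (py : List (List Int)) (n : Int) : List (List Int) × List Int :=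
  let qual := py.filter (fun row => decide (n ≤ (row.length : Int)))
  ((PySem.List.pyRange 0 n 1).map (fun j =>
      qual.flatMap
        (fun row => PySem.List.slice row (some j) (some (j + (row.length : Int) - n + 1)))),
   (PySem.List.enumerate py 0).flatMap (fun p =>
      (PySem.List.pyRange 0 ((p.2.length : Int) - n + 1) 1).map (fun _ => p.1)))

-- ===== PRECONDITION & SPEC =====
def Spec_ref_ngrams_py (py : List (List Int)) (n : Int) (out : List (List Int) × List Int) : Prop := out = ref_ngrams_py_alt py n
instance (py : List (List Int)) (n : Int) (out : List (List Int) × List Int) : Decidable (Spec_ref_ngrams_py py n out) := by unfold Spec_ref_ngrams_py; infer_instance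

-- ===== CLAIM (what is proved, stated in full; the proofs are below) =====
def Claim_equal_ref_ngrams_py : Prop := ∀ (py : List (List Int)) (n : Int), Dom_ref_ngrams_py py n → Spec_ref_ngrams_py py n (ref_ngrams_py py n)

-- ===== LEMMAS AND PROOFS =====

-- a range over an Int upper bound is the range over its toNat
lemma pyRange_zero_toNat (n : Int) :
    PySem.List.pyRange 0 n 1 = PySem.List.pyRange 0 ((n.toNat : Int)) 1 := by
  by_cases h : 0 ≤ n
  · rw [Int.toNat_of_nonneg h]
  · rw [PySem.List.pyRange_one_eq_nil (by omega), PySem.List.pyRange_one_eq_nil (by omega)]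

-- A's inner j-loop appends one value to every column below m
lemma jloop (m : Nat) (cols : List (List Int)) (v : Int → Int) :
    (PySem.List.pyRange 0 (m : Int) 1).foldl
      (fun cs j => cs.set j.toNat (cs.getD j.toNat [] ++ [v j])) cols
    = cols.mapIdx (fun j c => if j < m then c ++ [v (j : Int)] else c) := by
  induction m generalizing cols with
  | zero =>
    rw [PySem.List.pyRange_one_eq_nil (by omega)]
    apply List.ext_getElem
    · simp
    · intro k h1 h2; simp [List.getElem_mapIdx]
  | succ m ih =>
    have hc : ((m + 1 : Nat) : Int) = (m : Int) + 1 := by push_cast; ring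
    rw [hc, PySem.List.pyRange_one_succ_right (by omega), List.foldl_append, ih]
    simp only [List.foldl_cons, List.foldl_nil, Int.toNat_natCast]
    by_cases hm : m < cols.length
    · have hget : ((cols.mapIdx (fun j c => if j < m then c ++ [v (j : Int)] else c)).getD m []) = cols[m] := by
        rw [List.getD_eq_getElem _ _ (by simpa using hm)]
        simp [List.getElem_mapIdx]
      rw [hget]
      apply List.ext_getElem
      · simp
      · intro k h1 h2
        rw [List.getElem_set]
        by_cases hkm : m = k
        · subst hkm; simp [List.getElem_mapIdx]
        · simp only [if_neg hkm, List.getElem_mapIdx]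
          split_ifs <;> first | rfl | omega
    · rw [List.set_eq_of_length_le (by simp; omega)]
      apply List.ext_getElem
      · simp
      · intro k h1 h2
        simp only [List.length_mapIdx] at h1 h2
        simp only [List.getElem_mapIdx]
        split_ifs <;> first | rfl | omega

-- appending twice columnwise is appending the concatenation
lemma mapIdx_append_comp (cols : List (List Int)) (m : Nat) (f g : Nat → List Int) :
    (cols.mapIdx (fun j c => if j < m then c ++ f j else c)).mapIdx
      (fun j c => if j < m then c ++ g j else c)
    = cols.mapIdx (fun j c => if j < m then c ++ (f j ++ g j) else c) := by
  apply List.ext_getElem <;> simp [List.getElem_mapIdx]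
  intro k hk _
  split_ifs <;> simp

-- the values A's start-loop appends to column j while scanning row r
def segF (r : List Int) (n : Int) (j : Int) : List Int :=
  (PySem.List.pyRange 0 ((r.length : Int) - n + 1) 1).map (fun s => PySem.List.pyGetD r (s + j) 0)

-- A's start-loop over one qualifying row
lemma rowloop (W : Nat) (r : List Int) (n i : Int) (cols : List (List Int)) (orig : List Int) :
    (PySem.List.pyRange 0 (W : Int) 1).foldl
      (fun st2 start =>
        ((PySem.List.pyRange 0 n 1).foldl
            (fun cs j => cs.set j.toNat (cs.getD j.toNat [] ++ [PySem.List.pyGetD r (start + j) 0]))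
            st2.1,
         st2.2 ++ [i])) (cols, orig)
    = (cols.mapIdx (fun j c => if j < n.toNat then
          c ++ (PySem.List.pyRange 0 (W : Int) 1).map (fun s => PySem.List.pyGetD r (s + (j : Int)) 0) else c),
       orig ++ List.replicate W i) := by
  induction W generalizing cols orig with
  | zero =>
    rw [show (((0:Nat)):Int) = 0 from rfl, PySem.List.pyRange_one_eq_nil (le_refl 0)]
    simp only [List.foldl_nil, List.map_nil, List.replicate_zero, List.append_nil]
    rw [Prod.mk.injEq]
    constructor
    · apply List.ext_getElem
      · simp
      · intro k h1 h2
        simp only [List.getElem_mapIdx]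
        split_ifs <;> simp
    · rfl
  | succ W ih =>
    have hc : ((W + 1 : Nat) : Int) = (W : Int) + 1 := by push_cast; ring
    rw [hc, PySem.List.pyRange_one_succ_right (by omega), List.foldl_append, ih]
    simp only [List.foldl_cons, List.foldl_nil]
    rw [pyRange_zero_toNat n, jloop, mapIdx_append_comp]
    rw [Prod.mk.injEq]
    constructor
    · apply congrArg (fun f => List.mapIdx f cols)
      funext j c
      rw [List.map_append]
      rfl
    · rw [List.append_assoc, ← List.replicate_succ']

def colsAll (n : Int) (ps : List (Int × List Int)) (j : Nat) : List Int :=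
  ps.flatMap (fun p => if ((p.2.length : Int)) < n then [] else segF p.2 n (j : Int))

def origAll (n : Int) (ps : List (Int × List Int)) : List Int :=
  ps.flatMap (fun p => if ((p.2.length : Int)) < n then [] else List.replicate ((p.2.length : Int) - n + 1).toNat p.1)

-- A's outer rows loop
lemma rowsloop (n : Int) (ps : List (Int × List Int)) (cols : List (List Int)) (orig : List Int) :
    ps.foldl
      (fun st p =>
        if ((p.2.length : Int)) < n then st
        else
          (PySem.List.pyRange 0 ((p.2.length : Int) - n + 1) 1).foldl
            (fun st2 start =>
              ((PySem.List.pyRange 0 n 1).foldl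
                  (fun cs j => cs.set j.toNat (cs.getD j.toNat [] ++ [PySem.List.pyGetD p.2 (start + j) 0]))
                  st2.1,
               st2.2 ++ [p.1]))
            st) (cols, orig)
    = (cols.mapIdx (fun j c => if j < n.toNat then c ++ colsAll n ps j else c),
       orig ++ origAll n ps) := by
  induction ps generalizing cols orig with
  | nil =>
    simp only [List.foldl_nil, colsAll, origAll, List.flatMap_nil, List.append_nil]
    rw [Prod.mk.injEq]
    constructor
    · apply List.ext_getElem
      · simp
      · intro k h1 h2
        simp only [List.getElem_mapIdx]
        split_ifs <;> simp
    · rfl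
  | cons p ps ih =>
    rw [List.foldl_cons]
    by_cases hlt : ((p.2.length : Int)) < n
    · rw [if_pos hlt, ih]
      simp only [colsAll, origAll, List.flatMap_cons, if_pos hlt, List.nil_append]
    · rw [if_neg hlt]
      have hW : (((p.2.length : Int) - n + 1).toNat : Int) = (p.2.length : Int) - n + 1 := by omega
      rw [show PySem.List.pyRange 0 ((p.2.length : Int) - n + 1) 1
            = PySem.List.pyRange 0 ((((p.2.length : Int) - n + 1).toNat : Int)) 1 by rw [hW]]
      rw [rowloop, ih, mapIdx_append_comp]
      simp only [colsAll, origAll, List.flatMap_cons, if_neg hlt]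
      rw [Prod.mk.injEq]
      constructor
      · apply congrArg (fun f => List.mapIdx f cols)
        funext j c
        rw [segF, hW]
      · rw [List.append_assoc]

-- a qualifying row's gathered column equals the slice B takes
lemma segF_eq_slice (r : List Int) (n : Int) (k : Nat) (hk : (k : Int) < n) (hn : n ≤ (r.length : Int)) :
    segF r n (k : Int) = PySem.List.slice r (some (k : Int)) (some ((k : Int) + (r.length : Int) - n + 1)) := by
  have hb : (0:Int) ≤ (k : Int) + (r.length : Int) - n + 1 := by omega
  rw [segF, PySem.List.slice_toNat r (by positivity) hb]
  apply List.ext_getElem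
  · simp only [List.length_map, PySem.List.length_pyRange_one, List.length_take, List.length_drop]
    omega
  · intro s h1 h2
    simp only [List.getElem_map, PySem.List.getElem_pyRange_one, List.getElem_take, List.getElem_drop]
    rw [PySem.List.pyGetD_eq_getElem]
    · congr 1
      simp only [PySem.List.length_pyRange_one, List.length_map] at h1
      omega
    · omega
    · simp only [PySem.List.length_pyRange_one, List.length_map] at h1
      omega

-- a flatMap over enumerate that ignores the index is a flatMap over the list
lemma flatMap_enumerate_snd {α β : Type} (xs : List α) (s : Int) (f : α → List β) :
    (PySem.List.enumerate xs s).flatMap (fun p => f p.2) = xs.flatMap f := by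
  induction xs generalizing s with
  | nil => simp [PySem.List.enumerate_nil]
  | cons x xs ih => rw [PySem.List.enumerate_cons, List.flatMap_cons, List.flatMap_cons, ih]

-- a flatMap guarded by a condition is a flatMap over the filtered list
lemma flatMap_ite_filter {α β : Type} (xs : List α) (P : α → Bool) (f : α → List β) :
    xs.flatMap (fun x => if P x then f x else []) = (xs.filter P).flatMap f := by
  induction xs with
  | nil => simp
  | cons x xs ih =>
    by_cases h : P x
    · rw [List.flatMap_cons, List.filter_cons_of_pos h, List.flatMap_cons, ih, if_pos h]
    · rw [List.flatMap_cons, List.filter_cons_of_neg h, if_neg h, List.nil_append, ih]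

-- ===== VERDICT (by name: the statement is the Claim_ definition above) =====
theorem ref_ngrams_py_spec : Claim_equal_ref_ngrams_py := by
  intro py n _
  unfold Spec_ref_ngrams_py ref_ngrams_py ref_ngrams_py_alt
  rw [rowsloop]
  rw [Prod.mk.injEq]
  constructor
  · -- columns
    apply List.ext_getElem
    · simp
    · intro k h1 h2
      simp only [List.length_mapIdx, List.length_map, PySem.List.length_pyRange_one] at h1
      simp only [List.getElem_mapIdx, List.getElem_map, PySem.List.getElem_pyRange_one]
      rw [if_pos (by omega : k < n.toNat)]
      rw [List.nil_append, colsAll,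
          flatMap_enumerate_snd py 0 (fun r => if ((r.length : Int)) < n then [] else segF r n (k:Int)), show ((0:Int) + (k:Int)) = (k:Int) by ring,
          ← flatMap_ite_filter py (fun row => decide (n ≤ (row.length : Int)))
            (fun row => PySem.List.slice row (some (k:Int)) (some ((k:Int) + (row.length : Int) - n + 1)))]
      apply List.flatMap_congr
      intro r hr
      by_cases h : n ≤ (r.length : Int)
      · rw [if_neg (by omega), if_pos (decide_eq_true h)]
        exact segF_eq_slice r n k (by omega) h
      · rw [if_pos (by omega), if_neg (by simp [h])]
  · -- origins
    rw [List.nil_append, origAll]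
    apply List.flatMap_congr
    intro p _
    by_cases h : ((p.2.length : Int)) < n
    · rw [if_pos h, PySem.List.pyRange_one_eq_nil (by omega), List.map_nil]
    · rw [if_neg h, pyRange_zero_toNat, PySem.List.pyRange_one]
      rw [List.map_map]
      have : ∀ (l : List Nat) (g : Nat → Int), l.map ((fun _ => p.1) ∘ g) = List.replicate l.length p.1 := by
        intro l g; induction l with
        | nil => rfl
        | cons a l ih =>
          simp only [List.map_cons, List.length_cons, List.replicate_succ]
          rw [ih]
          rfl
      rw [this, List.length_range]
      congr 1
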